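-- pv_equiv track=rewrite | github.com/dmontielg/TissueID | TissueID.py | find_all_indels
-- ===== SOURCE A (Python) =====
-- def find_all_indels(s):
--     find_all = lambda c,s: [x for x in range(c.find(s), len(c)) if c[x] == s]
--     list_pos = []
--     for i in find_all(s,"-"):
--         list_pos.append(i)
--     for i in find_all(s,"+"):
--         list_pos.append(i)
--     return sorted(list_pos)
-- ===== SOURCE B (Python) =====
-- def find_all_indels(s):
--     return [i for i, ch in enumerate(s) if ch == '-' or ch == '+']
-- ===== Notes on version B (the rewrite author's own statement) =====
-- stated objective: simpler
-- what changed: B is one enumerate pass collecting the indices of indel characters (minus and plus) already in increasing order, replacing A's two find-then-scan filtered passes plus a final sort; B also returns an empty list on the empty string where A raises.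
-- outside the precondition, e.g. on find_all_indels(''): A raises IndexError, B returns []
-- crash fix: On the empty string A raises IndexError (str.find gives -1, so range(-1,0) makes it index the string at -1); B returns []. — e.g. on find_all_indels(""): A raises IndexError, B returns []
import Mathlib
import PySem

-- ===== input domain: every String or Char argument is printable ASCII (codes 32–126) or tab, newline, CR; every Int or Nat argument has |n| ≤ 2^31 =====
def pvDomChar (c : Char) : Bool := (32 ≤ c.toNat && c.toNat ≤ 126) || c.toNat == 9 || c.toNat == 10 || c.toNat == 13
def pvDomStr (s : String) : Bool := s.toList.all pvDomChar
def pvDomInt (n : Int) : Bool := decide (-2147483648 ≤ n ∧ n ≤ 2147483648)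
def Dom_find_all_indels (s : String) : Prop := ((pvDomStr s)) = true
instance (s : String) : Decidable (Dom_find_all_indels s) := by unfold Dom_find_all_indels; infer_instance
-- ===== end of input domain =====

-- B replaces A's two find-then-scan filtered passes plus a final sort by ONE enumerate pass
-- (the indices come out already increasing); on the empty string A raises IndexError, B returns [].

-- ===== PORT A =====
-- find_all = lambda c,s: [x for x in range(c.find(s), len(c)) if c[x] == s]
def pvFindAllA (c : List Char) (ch : Char) : List Int :=
  (PySem.List.pyRange (PySem.Chars.find c [ch]) (c.length : Int) 1).filter
    (fun x => PySem.List.pyGet? c x == some ch)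

def find_all_indels (s : String) : List Int :=
  let c := s.toList
  let listPos : List Int := []
  let listPos := (pvFindAllA c '-').foldl (fun acc i => acc ++ [i]) listPos
  let listPos := (pvFindAllA c '+').foldl (fun acc i => acc ++ [i]) listPos
  PySem.List.sorted listPos (fun x => x) false

-- ===== PORT B =====
-- return [i for i, ch in enumerate(s) if ch == '-' or ch == '+']
def find_all_indels_alt (s : String) : List Int :=
  ((PySem.List.enumerate s.toList 0).filter (fun p => p.2 == '-' || p.2 == '+')).map (fun p => p.1)

-- ===== PRECONDITION & SPEC =====
-- Pre_ excludes only the empty string, on which A raises IndexError (it evaluates ''[-1]).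
def Pre_find_all_indels (s : String) : Prop := s ≠ ""
instance (s : String) : Decidable (Pre_find_all_indels s) := by unfold Pre_find_all_indels; infer_instance
def pvWitness_find_all_indels : String := "a-b+c"

-- On the empty string A raises IndexError (c.find gives -1, so range(-1,0) makes it index ''[-1]); B returns [].
def Raises_find_all_indels (s : String) : Prop := s = ""
instance (s : String) : Decidable (Raises_find_all_indels s) := by unfold Raises_find_all_indels; infer_instance
def pvRaiseWitness_find_all_indels : String := ""
def pvRaiseWitnessOut_find_all_indels : List Int := []

def Spec_find_all_indels (s : String) (out : List Int) : Prop := out = find_all_indels_alt s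
instance (s : String) (out : List Int) : Decidable (Spec_find_all_indels s out) := by unfold Spec_find_all_indels; infer_instance

-- ===== CLAIM (what is proved, stated in full; the proofs are below) =====
def Claim_equal_find_all_indels : Prop := ∀ (s : String), Dom_find_all_indels s → Pre_find_all_indels s → Spec_find_all_indels s (find_all_indels s)
def Claim_raises_find_all_indels : Prop := (∀ (s : String), Dom_find_all_indels s → Raises_find_all_indels s → ¬ Pre_find_all_indels s) ∧ (Dom_find_all_indels (pvRaiseWitness_find_all_indels) ∧ Raises_find_all_indels (pvRaiseWitness_find_all_indels) ∧ find_all_indels_alt (pvRaiseWitness_find_all_indels) = pvRaiseWitnessOut_find_all_indels)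

-- ===== LEMMAS AND PROOFS =====

-- Filtering with a disjunction of mutually exclusive tests is a permutation of the two filters appended.
theorem pv_filter_or_perm {α : Type} (p q : α → Bool) (l : List α)
    (hd : ∀ x, ¬ (p x = true ∧ q x = true)) :
    (l.filter (fun x => p x || q x)).Perm (l.filter p ++ l.filter q) := by
  induction l with
  | nil => simp
  | cons a t ih =>
    by_cases hp : p a = true
    · have hq : q a = false := by
        cases hq : q a with
        | false => rfl
        | true => exact absurd ⟨hp, hq⟩ (hd a)
      simpa [List.filter_cons, hp, hq] using ih.cons a
    · by_cases hq : q a = true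
      · have := (ih.cons a).trans (List.perm_middle (a := a) (l₁ := t.filter p) (l₂ := t.filter q)).symm
        simpa [List.filter_cons, hp, hq] using this
      · simp only [Bool.not_eq_true] at hp hq
        simpa [List.filter_cons, hp, hq] using ih

-- A singleton is a prefix of c.drop k exactly when the character at k matches.
theorem pv_prefix_singleton (c : List Char) (ch : Char) (k : Nat) (hk : k < c.length) :
    ([ch] <+: c.drop k) ↔ getElem c k hk = ch := by
  rw [List.drop_eq_getElem_cons hk]
  constructor
  · rintro ⟨t, ht⟩
    simp only [List.singleton_append, List.cons.injEq] at ht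
    exact ht.1.symm
  · rintro rfl
    exact ⟨_, rfl⟩

-- A's per-character scan starting at c.find(ch) equals the full scan from 0 (c nonempty):
-- indices before the first occurrence never match, and when find = -1 nothing matches at all
-- (the extra index -1 reads the last character, which is then not ch).
theorem pv_findAllA_eq_full (c : List Char) (ch : Char) (hc : c ≠ []) :
    pvFindAllA c ch
      = (PySem.List.pyRange 0 (c.length : Int) 1).filter
          (fun x => PySem.List.pyGet? c x == some ch) := by
  have hn : (0:Int) < c.length := by
    have := List.length_pos_iff.mpr hc; exact_mod_cast this
  unfold pvFindAllA
  rcases lt_or_ge (PySem.Chars.find c [ch]) 0 with hneg | hpos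
  · have hm1 : PySem.Chars.find c [ch] = -1 := by
      have := PySem.Chars.neg_one_le_find c [ch]; omega
    have hnotin : ch ∉ c := by
      have := (PySem.Chars.find_eq_neg_one_iff c [ch]).mp hm1
      exact fun hmem => this ((List.singleton_infix_iff ch c).mpr hmem)
    rw [hm1, PySem.List.pyRange_one_cons (by omega), List.filter_cons]
    have hpred : (PySem.List.pyGet? c (-1) == some ch) = false := by
      rw [PySem.List.pyGet?_neg_one]
      rw [List.getLast?_eq_some_getLast hc]
      simp only [beq_eq_false_iff_ne, ne_eq, Option.some.injEq]
      exact fun h => hnotin (h ▸ List.getLast_mem hc)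
    rw [hpred]
    simp
  · have hle : PySem.Chars.find c [ch] ≤ (c.length : Int) := PySem.Chars.find_le_length c [ch]
    rw [PySem.List.pyRange_one_append 0 (PySem.Chars.find c [ch]) (c.length : Int) hpos hle,
        List.filter_append]
    have hnil : (PySem.List.pyRange 0 (PySem.Chars.find c [ch])).filter
        (fun x => PySem.List.pyGet? c x == some ch) = [] := by
      rw [List.filter_eq_nil_iff]
      intro x hx
      rw [PySem.List.mem_pyRange_one] at hx
      obtain ⟨hx0, hxf⟩ := hx
      have hxlen : x < (c.length : Int) := lt_of_lt_of_le hxf hle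
      have hklen : x.toNat < c.length := by omega
      rw [PySem.List.pyGet?_eq_some_getElem c hx0 hxlen]
      intro heq
      simp only [beq_iff_eq, Option.some.injEq] at heq
      have := (PySem.Chars.find_spec (s := c) (sub := [ch]) hpos).2 x.toNat (by omega)
      exact this ((pv_prefix_singleton c ch x.toNat hklen).mpr heq)
    rw [hnil, List.nil_append]

-- B is the filter of range(0, len(s)) by 'character there is - or +'.
theorem pv_alt_eq_filter (s : String) :
    find_all_indels_alt s
      = (PySem.List.pyRange 0 (s.toList.length : Int) 1).filter
          (fun x => PySem.List.pyGet? s.toList x == some '-'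
                    || PySem.List.pyGet? s.toList x == some '+') := by
  unfold find_all_indels_alt
  rw [PySem.List.enumerate_eq_map_pyRange s.toList '-']
  rw [List.filter_map, List.map_map]
  have hlen : PySem.List.len s.toList = (s.toList.length : Int) := by
    simp [PySem.List.len]
  rw [hlen]
  have : ∀ x ∈ PySem.List.pyRange 0 (s.toList.length : Int),
      ((fun p => p.2 == '-' || p.2 == '+') ∘ fun j => (j, PySem.List.pyGetD s.toList j '-')) x
      = (fun x => PySem.List.pyGet? s.toList x == some '-' || PySem.List.pyGet? s.toList x == some '+') x := by
    intro x hx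
    rw [PySem.List.mem_pyRange_one] at hx
    obtain ⟨hx0, hxl⟩ := hx
    simp only [Function.comp]
    rw [PySem.List.pyGetD_eq_getElem s.toList '-' hx0 hxl,
        PySem.List.pyGet?_eq_some_getElem s.toList hx0 hxl]
    simp
  rw [List.filter_congr this]
  have : ((fun p : Int × Char => p.1) ∘ fun j => (j, PySem.List.pyGetD s.toList j '-')) = id := rfl
  rw [this, List.map_id]

-- ===== VERDICT (by name: the statement is the Claim_ definition above) =====
theorem find_all_indels_spec : Claim_equal_find_all_indels := by
  intro s _ hpre
  unfold Spec_find_all_indels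
  have hc : s.toList ≠ [] := fun h => hpre (String.toList_inj.mp (by simpa using h))
  unfold find_all_indels
  simp only [PySem.List.foldl_append_singleton_eq_self, List.nil_append]
  rw [pv_alt_eq_filter s, pv_findAllA_eq_full _ _ hc, pv_findAllA_eq_full _ _ hc]
  refine PySem.List.sorted_id_eq_of_perm_of_pairwise _ _ ?_ ?_
  · refine pv_filter_or_perm _ _ _ ?_
    rintro x ⟨h1, h2⟩
    simp only [beq_iff_eq] at h1 h2
    rw [h1] at h2
    exact absurd (Option.some.inj h2) (by decide)
  · exact ((PySem.List.pairwise_lt_pyRange_one _ _).filter _).imp (fun h => le_of_lt h)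

@[simp] theorem find_all_indels_raises : Claim_raises_find_all_indels := by
  unfold Claim_raises_find_all_indels
  exact ⟨fun s _ h hp => hp h, by decide⟩
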